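-- pv_equiv track=rewrite | github.com/ganeshparsads/OAs | new_oa/sub.py | get_subarrays
-- ===== SOURCE A (Python) =====
-- def get_subarrays(arr):
--     subarrays = []
--     current_subarray = []
--
--     for element in arr:
--         # Extend the current subarray
--         current_subarray.append(element)
--
--         # If the subarray length is 3 or more, add it to the result
--         if len(current_subarray) >= 3:
--             subarrays.append(current_subarray[:])
--
--         # If the subarray length exceeds 3, remove the leftmost element
--         if len(current_subarray) > 3:
--             current_subarray.pop(0)
--
--     return subarrays
-- ===== SOURCE B (Python) =====
-- def get_subarrays(arr):
--     # Closed-form: first the 3-prefix, then every 4-window, by index slicing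
--     # (reproduces A's exact output without a mutating sliding buffer).
--     n = len(arr)
--     if n < 3:
--         return []
--     return [list(arr[:3])] + [list(arr[i:i + 4]) for i in range(n - 3)]
-- ===== Notes on version B (the rewrite author's own statement) =====
-- stated objective: simpler
-- what changed: Replaces the mutating sliding-buffer loop (append/copy/pop) with a closed-form construction: the 3-element prefix followed by each 4-element window taken directly by index slice.
import Mathlib
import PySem

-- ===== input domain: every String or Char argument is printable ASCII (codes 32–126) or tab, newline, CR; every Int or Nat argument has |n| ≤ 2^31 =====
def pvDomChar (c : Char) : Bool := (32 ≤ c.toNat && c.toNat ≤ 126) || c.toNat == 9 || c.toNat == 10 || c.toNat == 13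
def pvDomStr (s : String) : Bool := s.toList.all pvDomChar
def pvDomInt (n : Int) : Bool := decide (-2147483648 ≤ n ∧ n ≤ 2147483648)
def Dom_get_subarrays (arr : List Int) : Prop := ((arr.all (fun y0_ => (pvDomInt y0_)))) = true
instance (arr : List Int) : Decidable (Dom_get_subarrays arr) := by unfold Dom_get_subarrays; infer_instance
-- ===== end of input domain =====

-- B replaces A's mutating sliding-buffer loop with a closed-form build
-- (3-prefix followed by each 4-window by index slice); objective: simpler.

-- ===== PORT A =====
-- loop body of A: append element, record a copy once length ≥ 3, pop the head once length > 3
def pvStepA (st : List (List Int) × List Int) (e : Int) : List (List Int) × List Int :=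
  let cur := st.2 ++ [e]
  let subs := if 3 ≤ cur.length then st.1 ++ [cur] else st.1
  let cur := if 3 < cur.length then cur.tail else cur  -- cur.pop(0); cur is nonempty here
  (subs, cur)

def get_subarrays (arr : List Int) : List (List Int) :=
  (arr.foldl pvStepA ([], [])).1

-- ===== PORT B =====
def get_subarrays_alt (arr : List Int) : List (List Int) :=
  let n : Int := arr.length
  if n < 3 then []
  else PySem.List.slice arr none (some 3) ::
    (PySem.List.pyRange 0 (n - 3) 1).map
      (fun i => PySem.List.slice arr (some i) (some (i + 4)))

-- ===== PRECONDITION & SPEC =====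
def Spec_get_subarrays (arr : List Int) (out : List (List Int)) : Prop := out = get_subarrays_alt arr
instance (arr : List Int) (out : List (List Int)) : Decidable (Spec_get_subarrays arr out) := by unfold Spec_get_subarrays; infer_instance

-- ===== CLAIM (what is proved, stated in full; the proofs are below) =====
def Claim_equal_get_subarrays : Prop := ∀ (arr : List Int), Dom_get_subarrays arr → Spec_get_subarrays arr (get_subarrays arr)

-- ===== LEMMAS AND PROOFS =====

-- drop/take normal form shared by both sides
def pvG (arr : List Int) : List (List Int) :=
  if arr.length < 3 then []
  else arr.take 3 :: (List.range (arr.length - 3)).map (fun i => (arr.drop i).take 4)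

theorem pvStepA_eq (subs : List (List Int)) (cur : List Int) (e : Int) :
    pvStepA (subs, cur) e =
      (if 3 ≤ (cur ++ [e]).length then subs ++ [cur ++ [e]] else subs,
       if 3 < (cur ++ [e]).length then (cur ++ [e]).tail else cur ++ [e]) := rfl

theorem pvAlt_eq_pvG (arr : List Int) : get_subarrays_alt arr = pvG arr := by
  unfold get_subarrays_alt pvG
  by_cases h : arr.length < 3
  · simp [h, show (arr.length : Int) < 3 by exact_mod_cast h]
  · have h3 : ¬ ((arr.length : Int) < 3) := by exact_mod_cast h
    rw [if_neg h3, if_neg h]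
    refine congrArg₂ _ ?_ ?_
    · rw [PySem.List.slice_to arr (by omega)]; rfl
    · rw [PySem.List.pyRange_one, List.map_map]
      have hn : ((arr.length : Int) - 3 - 0).toNat = arr.length - 3 := by omega
      rw [hn]
      apply List.map_congr_left
      intro k hk
      simp only [Function.comp]
      rw [PySem.List.slice_toNat arr (by omega) (by omega)]
      congr 1
      · omega
      · congr 1; omega

theorem pvG_append (xs : List Int) (x : Int) :
    pvG (xs ++ [x]) =
      if xs.length < 2 then []
      else pvG xs ++ [xs.drop (xs.length - 3) ++ [x]] := by
  unfold pvG
  rcases Nat.lt_or_ge xs.length 2 with h2 | h2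
  · simp [List.length_append, show xs.length + 1 < 3 by omega, h2]
  · rcases Nat.lt_or_ge xs.length 3 with h3 | h3
    · -- xs.length = 2
      rw [if_neg (by simp; omega), if_neg (by omega), if_pos (by omega)]
      rw [show xs.drop (xs.length - 3) = xs by rw [show xs.length - 3 = 0 by omega]; rfl]
      rw [show (xs ++ [x]).length - 3 = 0 by simp; omega]
      simp [List.take_of_length_le (show (xs ++ [x]).length ≤ 3 by simp; omega)]
    · -- xs.length ≥ 3
      rw [if_neg (by simp; omega), if_neg (by omega), if_neg (by omega)]
      refine congrArg₂ _ (List.take_append_of_le_length (by omega)) ?_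
      rw [show (xs ++ [x]).length - 3 = (xs.length - 3) + 1 by simp; omega]
      rw [List.range_succ, List.map_append]
      refine congrArg₂ _ ?_ ?_
      · apply List.map_congr_left
        intro i hi
        have hi' : i < xs.length - 3 := List.mem_range.mp hi
        rw [List.drop_append_of_le_length (by omega)]
        rw [List.take_append_of_le_length (by simp; omega)]
      · simp only [List.map_cons, List.map_nil]
        rw [List.drop_append_of_le_length (by omega)]
        rw [List.take_of_length_le (by simp; omega)]

theorem pvFold_eq (arr : List Int) :
    arr.foldl pvStepA ([], []) = (pvG arr, arr.drop (arr.length - 3)) := by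
  induction arr using List.reverseRecOn with
  | nil => simp [pvG]
  | append_singleton xs x ih =>
    rw [List.foldl_append, ih]
    simp only [List.foldl_cons, List.foldl_nil]
    rw [pvStepA_eq, pvG_append]
    rcases Nat.lt_or_ge xs.length 2 with h2 | h2
    · have hd : xs.drop (xs.length - 3) = xs := by
        rw [show xs.length - 3 = 0 by omega]; rfl
      have hG : pvG xs = [] := by unfold pvG; rw [if_pos (by omega)]
      rw [hd, hG]
      have hc1 : ¬ 3 ≤ (xs ++ [x]).length := by simp; omega
      have hc2 : ¬ 3 < (xs ++ [x]).length := by simp; omega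
      rw [if_neg hc1, if_neg hc2, if_pos h2]
      rw [show (xs ++ [x]).length - 3 = 0 by simp; omega, List.drop_zero]
    · rcases Nat.lt_or_ge xs.length 3 with h3 | h3
      · -- xs.length = 2: buffer reaches length 3, recorded, no pop
        have hd : xs.drop (xs.length - 3) = xs := by
          rw [show xs.length - 3 = 0 by omega]; rfl
        rw [hd]
        have hc1 : 3 ≤ (xs ++ [x]).length := by simp; omega
        have hc2 : ¬ 3 < (xs ++ [x]).length := by simp; omega
        rw [if_pos hc1, if_neg hc2, if_neg (by omega)]
        rw [show (xs ++ [x]).length - 3 = 0 by simp; omega, List.drop_zero]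
      · -- xs.length ≥ 3: buffer of 3, records the 4-window, pops the head
        have hbuf : (xs.drop (xs.length - 3)).length = 3 := by simp; omega
        have hc1 : 3 ≤ (xs.drop (xs.length - 3) ++ [x]).length := by simp [hbuf]
        have hc2 : 3 < (xs.drop (xs.length - 3) ++ [x]).length := by simp [hbuf]
        rw [if_pos hc1, if_pos hc2, if_neg (by omega)]
        refine congrArg₂ _ rfl ?_
        rw [← List.drop_append_of_le_length (by omega : xs.length - 3 ≤ xs.length),
          List.tail_drop]
        congr 1
        simp; omega

-- ===== VERDICT (by name: the statement is the Claim_ definition above) =====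
theorem get_subarrays_spec : Claim_equal_get_subarrays := by
  intro arr _
  unfold Spec_get_subarrays get_subarrays
  rw [pvFold_eq, pvAlt_eq_pvG]
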